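-- pv_equiv track=rewrite | github.com/huang1997214/MoCaNet | Motif_Gen.py | gen_square_motif
-- ===== SOURCE A (Python) =====
-- def check_square(edge_1, edge_2, edge_3, edges_list):
--     flag = True
--     node1_1 = edge_1[0]
--     node1_2 = edge_1[1]
--     node2_1 = edge_2[0]
--     node2_2 = edge_2[1]
--     node3_1 = edge_3[0]
--     node3_2 = edge_3[1]
--     if node1_2 != node2_1:
--         flag = False
--     if node2_2 != node3_1:
--         flag = False
--     test_edge = [node3_2, node1_1]
--     if test_edge not in edges_list:
--         flag = False
--     return flag
--
-- def gen_square_motif(edges_list):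
--     new_edge_list = []
--     for edge_1 in edges_list:
--         for edge_2 in edges_list:
--             for edge_3 in edges_list:
--                 if edge_1 == edge_2 or edge_1 == edge_3 or edge_2 == edge_3:
--                     continue
--                 flag = check_square(edge_1, edge_2, edge_3, edges_list)
--                 if flag == True:
--                     new_node_1 = edge_1[0]
--                     new_node_2 = edge_1[1]
--                     new_node_3 = edge_2[1]
--                     new_node_4 = edge_3[1]
--                     if [new_node_1, new_node_2] not in new_edge_list:
--                         new_edge_list.append([new_node_1, new_node_2])
--                     if [new_node_2, new_node_3] not in new_edge_list:
--                         new_edge_list.append([new_node_2, new_node_3])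
--                     if [new_node_3, new_node_4] not in new_edge_list:
--                         new_edge_list.append([new_node_3, new_node_4])
--                     if [new_node_4, new_node_1] not in new_edge_list:
--                         new_edge_list.append([new_node_4, new_node_1])
--     if len(new_edge_list) <= 4:
--         new_edge_list = edges_list
--     return new_edge_list
-- ===== SOURCE B (Python) =====
-- def gen_square_motif(edges_list):
--     # index edges by start node so only chained triples e1 -> e2 -> e3 are visited
--     adj = {}
--     for e in edges_list:
--         adj.setdefault(e[0], []).append(e)
--     edge_set = {tuple(e) for e in edges_list}
--     out = []
--     for e1 in edges_list:
--         for e2 in adj.get(e1[1], []):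
--             for e3 in adj.get(e2[1], []):
--                 if e1 == e2 or e1 == e3 or e2 == e3:
--                     continue
--                 if (e3[1], e1[0]) in edge_set:
--                     for u, v in ((e1[0], e1[1]), (e1[1], e2[1]), (e2[1], e3[1]), (e3[1], e1[0])):
--                         if [u, v] not in out:
--                             out.append([u, v])
--     return out if len(out) > 4 else edges_list
-- ===== Notes on version B (the rewrite author's own statement) =====
-- stated objective: faster
-- what changed: Replaces the O(E^3) triple loop over all edge pairs (each with an O(E) list-membership square check) by an order-preserving adjacency dict indexed by start node so only chained edge triples are visited, with the edge set kept as a set of tuples for O(1) closing-edge lookup; Pre_ excludes lists containing an edge shorter than 2 elements, on which A raises IndexError whenever three pairwise-distinct edges exist and otherwise returns the input only by accident, while B's chaining always indexes e[0] and e[1] and raises there.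
-- outside the precondition, e.g. on gen_square_motif([[], []]): A returns [[], []], B raises IndexError
import Mathlib
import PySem

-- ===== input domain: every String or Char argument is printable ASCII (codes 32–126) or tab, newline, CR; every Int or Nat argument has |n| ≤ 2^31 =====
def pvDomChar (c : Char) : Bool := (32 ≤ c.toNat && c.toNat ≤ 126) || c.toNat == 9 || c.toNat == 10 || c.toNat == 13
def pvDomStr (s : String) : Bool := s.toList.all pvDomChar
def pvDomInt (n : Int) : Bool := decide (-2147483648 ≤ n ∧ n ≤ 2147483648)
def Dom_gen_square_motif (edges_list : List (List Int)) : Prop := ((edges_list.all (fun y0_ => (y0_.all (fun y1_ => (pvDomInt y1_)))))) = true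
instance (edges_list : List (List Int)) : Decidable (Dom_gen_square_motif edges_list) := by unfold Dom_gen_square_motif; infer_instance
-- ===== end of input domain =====

-- B replaces A's O(E^3) scan of all edge triples (each with an O(E) list-membership square check)
-- by an adjacency dict indexed by start node, chaining only matching edges, with the edges kept
-- in a set for the closing-edge lookup.

-- ===== PORT A =====
-- edge[i] is ported as pyGetD edge i 0: Python raises IndexError on edges shorter than 2 exactly
-- where this default could be read, and Pre_gen_square_motif excludes those inputs.
def check_square (edge_1 edge_2 edge_3 : List Int) (edges_list : List (List Int)) : Bool :=
  let flag := true
  let node1_1 := PySem.List.pyGetD edge_1 0 0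
  let node1_2 := PySem.List.pyGetD edge_1 1 0
  let node2_1 := PySem.List.pyGetD edge_2 0 0
  let node2_2 := PySem.List.pyGetD edge_2 1 0
  let node3_1 := PySem.List.pyGetD edge_3 0 0
  let node3_2 := PySem.List.pyGetD edge_3 1 0
  let flag := if node1_2 ≠ node2_1 then false else flag
  let flag := if node2_2 ≠ node3_1 then false else flag
  let test_edge := [node3_2, node1_1]
  let flag := if test_edge ∉ edges_list then false else flag
  flag

-- the innermost loop body of A
def aBody (edges_list : List (List Int)) (edge_1 edge_2 : List Int)
    (acc : List (List Int)) (edge_3 : List Int) : List (List Int) :=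
  if edge_1 = edge_2 ∨ edge_1 = edge_3 ∨ edge_2 = edge_3 then acc
  else if check_square edge_1 edge_2 edge_3 edges_list = true then
    let new_node_1 := PySem.List.pyGetD edge_1 0 0
    let new_node_2 := PySem.List.pyGetD edge_1 1 0
    let new_node_3 := PySem.List.pyGetD edge_2 1 0
    let new_node_4 := PySem.List.pyGetD edge_3 1 0
    let l1 := if [new_node_1, new_node_2] ∈ acc then acc else acc ++ [[new_node_1, new_node_2]]
    let l2 := if [new_node_2, new_node_3] ∈ l1 then l1 else l1 ++ [[new_node_2, new_node_3]]
    let l3 := if [new_node_3, new_node_4] ∈ l2 then l2 else l2 ++ [[new_node_3, new_node_4]]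
    let l4 := if [new_node_4, new_node_1] ∈ l3 then l3 else l3 ++ [[new_node_4, new_node_1]]
    l4
  else acc

def aLoop2 (edges_list : List (List Int)) (edge_1 : List Int)
    (acc : List (List Int)) (edge_2 : List Int) : List (List Int) :=
  edges_list.foldl (aBody edges_list edge_1 edge_2) acc

def aLoop1 (edges_list : List (List Int)) (acc : List (List Int)) (edge_1 : List Int) :
    List (List Int) :=
  edges_list.foldl (aLoop2 edges_list edge_1) acc

def gen_square_motif (edges_list : List (List Int)) : List (List Int) :=
  let new_edge_list := edges_list.foldl (aLoop1 edges_list) []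
  if new_edge_list.length ≤ 4 then edges_list else new_edge_list

-- ===== PORT B =====
-- the dedup append of Source B's inner `if [u, v] not in out: out.append([u, v])`
def gsm_add (out : List (List Int)) (u v : Int) : List (List Int) :=
  if [u, v] ∈ out then out else out ++ [[u, v]]

def bBody (edge_set : PySem.Set (List Int)) (e1 e2 : List Int)
    (acc : List (List Int)) (e3 : List Int) : List (List Int) :=
  if e1 = e2 ∨ e1 = e3 ∨ e2 = e3 then acc
  else if [PySem.List.pyGetD e3 1 0, PySem.List.pyGetD e1 0 0] ∈ edge_set then
    gsm_add (gsm_add (gsm_add (gsm_add acc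
      (PySem.List.pyGetD e1 0 0) (PySem.List.pyGetD e1 1 0))
      (PySem.List.pyGetD e1 1 0) (PySem.List.pyGetD e2 1 0))
      (PySem.List.pyGetD e2 1 0) (PySem.List.pyGetD e3 1 0))
      (PySem.List.pyGetD e3 1 0) (PySem.List.pyGetD e1 0 0)
  else acc

def bLoop2 (adj : PySem.Dict Int (List (List Int))) (edge_set : PySem.Set (List Int))
    (e1 : List Int) (acc : List (List Int)) (e2 : List Int) : List (List Int) :=
  (adj.getD (PySem.List.pyGetD e2 1 0) []).foldl (bBody edge_set e1 e2) acc

def bLoop1 (adj : PySem.Dict Int (List (List Int))) (edge_set : PySem.Set (List Int))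
    (acc : List (List Int)) (e1 : List Int) : List (List Int) :=
  (adj.getD (PySem.List.pyGetD e1 1 0) []).foldl (bLoop2 adj edge_set e1) acc

def gen_square_motif_alt (edges_list : List (List Int)) : List (List Int) :=
  let adj := edges_list.foldl
    (fun d e => d.modify (PySem.List.pyGetD e 0 0) [] (fun l => l ++ [e])) PySem.Dict.empty
  let edge_set := PySem.Set.ofList edges_list
  let out := edges_list.foldl (bLoop1 adj edge_set) []
  if 4 < out.length then out else edges_list

-- ===== PRECONDITION & SPEC =====
-- Pre_ excludes lists containing an edge shorter than 2 elements: on those A raises IndexError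
-- whenever three pairwise-distinct edges exist and otherwise returns the input only because its
-- dedup guard happens to skip everything, while B's chaining always indexes e[0] and e[1] and
-- raises IndexError there.
def Pre_gen_square_motif (edges_list : List (List Int)) : Prop :=
  ∀ e ∈ edges_list, 2 ≤ e.length

instance (edges_list : List (List Int)) : Decidable (Pre_gen_square_motif edges_list) := by
  unfold Pre_gen_square_motif; infer_instance

def pvWitness_gen_square_motif : List (List Int) :=
  [[0, 1], [1, 2], [2, 3], [3, 0], [7, 7]]

def Spec_gen_square_motif (edges_list : List (List Int)) (out : List (List Int)) : Prop :=
  out = gen_square_motif_alt edges_list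
instance (edges_list : List (List Int)) (out : List (List Int)) :
    Decidable (Spec_gen_square_motif edges_list out) := by
  unfold Spec_gen_square_motif; infer_instance

-- ===== CLAIM (what is proved, stated in full; the proofs are below) =====
def Claim_equal_gen_square_motif : Prop :=
  ∀ (edges_list : List (List Int)), Dom_gen_square_motif edges_list →
    Pre_gen_square_motif edges_list →
    Spec_gen_square_motif edges_list (gen_square_motif edges_list)


-- ===== LEMMAS AND PROOFS =====

theorem foldl_id_mem {α β : Type} (f : β → α → β) (l : List α)
    (h : ∀ x ∈ l, ∀ acc, f acc x = acc) : ∀ acc, l.foldl f acc = acc := by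
  induction l with
  | nil => intro acc; rfl
  | cons x l ih =>
    intro acc
    rw [List.foldl_cons, h x (by simp) acc]
    exact ih (fun y hy => h y (by simp [hy])) acc

theorem foldl_filter_of_id {α β : Type} (f : β → α → β) (p : α → Bool) (l : List α)
    (h : ∀ x ∈ l, p x = false → ∀ acc, f acc x = acc) :
    ∀ acc, l.foldl f acc = (l.filter p).foldl f acc := by
  induction l with
  | nil => intro acc; rfl
  | cons x l ih =>
    intro acc
    have ih' := ih (fun y hy hp => h y (by simp [hy]) hp)
    by_cases hp : p x = true
    · rw [List.foldl_cons, List.filter_cons_of_pos hp, List.foldl_cons]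
      exact ih' _
    · rw [List.foldl_cons, h x (by simp) (by simpa using hp),
        List.filter_cons_of_neg (by simpa using hp)]
      exact ih' _

theorem foldl_congr_mem' {α β : Type} (f g : β → α → β) (l : List α)
    (h : ∀ x ∈ l, ∀ acc, f acc x = g acc x) : ∀ acc, l.foldl f acc = l.foldl g acc := by
  induction l with
  | nil => intro acc; rfl
  | cons x l ih =>
    intro acc
    rw [List.foldl_cons, List.foldl_cons, h x (by simp)]
    exact ih (fun y hy => h y (by simp [hy])) _

theorem check_square_eq (e1 e2 e3 : List Int) (L : List (List Int)) :
    check_square e1 e2 e3 L =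
      (decide (PySem.List.pyGetD e1 1 0 = PySem.List.pyGetD e2 0 0) &&
       decide (PySem.List.pyGetD e2 1 0 = PySem.List.pyGetD e3 0 0) &&
       decide ([PySem.List.pyGetD e3 1 0, PySem.List.pyGetD e1 0 0] ∈ L)) := by
  by_cases h1 : PySem.List.pyGetD e1 1 0 = PySem.List.pyGetD e2 0 0 <;>
  by_cases h2 : PySem.List.pyGetD e2 1 0 = PySem.List.pyGetD e3 0 0 <;>
  by_cases h3 : [PySem.List.pyGetD e3 1 0, PySem.List.pyGetD e1 0 0] ∈ L <;>
  simp [check_square, h1, h2, h3]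

theorem adj_getD (L : List (List Int)) (v : Int) :
    (L.foldl (fun d e => d.modify (PySem.List.pyGetD e 0 0) [] (fun l => l ++ [e]))
        PySem.Dict.empty).getD v [] =
      L.filter (fun e => PySem.List.pyGetD e 0 0 == v) := by
  have h := PySem.Dict.getD_foldl_modify_append
    (l := L.map (fun e => (PySem.List.pyGetD e 0 0, e)))
    (d := (PySem.Dict.empty : PySem.Dict Int (List (List Int)))) (c := v)
  rw [List.foldl_map] at h
  simpa [List.filter_map, List.map_map, Function.comp_def] using h

-- ===== VERDICT (by name: the statement is the Claim_ definition above) =====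
theorem gen_square_motif_spec : Claim_equal_gen_square_motif := by
  intro L _ _
  unfold Spec_gen_square_motif
  simp only [gen_square_motif, gen_square_motif_alt]
  have hmain : L.foldl (aLoop1 L) [] =
      L.foldl (bLoop1
        (L.foldl (fun d e => d.modify (PySem.List.pyGetD e 0 0) [] (fun l => l ++ [e]))
          PySem.Dict.empty)
        (PySem.Set.ofList L)) [] := by
    refine foldl_congr_mem' _ _ _ ?_ []
    intro e1 _ acc
    unfold aLoop1 bLoop1
    rw [adj_getD]
    have hskip2 : ∀ e2 ∈ L,
        (fun e => PySem.List.pyGetD e 0 0 == PySem.List.pyGetD e1 1 0) e2 = false →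
        ∀ acc2, aLoop2 L e1 acc2 e2 = acc2 := by
      intro e2 _ hp acc2
      refine foldl_id_mem _ _ ?_ _
      intro e3 _ acc3
      have hne : ¬ (PySem.List.pyGetD e1 1 0 = PySem.List.pyGetD e2 0 0) := by
        intro hc; simp [hc.symm] at hp
      simp [aBody, check_square_eq, hne]
    rw [foldl_filter_of_id (aLoop2 L e1)
      (fun e => PySem.List.pyGetD e 0 0 == PySem.List.pyGetD e1 1 0) L hskip2 acc]
    refine foldl_congr_mem' _ _ _ ?_ acc
    intro e2 he2 acc2
    have h12 : PySem.List.pyGetD e1 1 0 = PySem.List.pyGetD e2 0 0 :=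
      (by simpa using (List.mem_filter.mp he2).2 : _ = _).symm
    unfold aLoop2 bLoop2
    rw [adj_getD]
    have hskip3 : ∀ e3 ∈ L,
        (fun e => PySem.List.pyGetD e 0 0 == PySem.List.pyGetD e2 1 0) e3 = false →
        ∀ acc3, aBody L e1 e2 acc3 e3 = acc3 := by
      intro e3 _ hp acc3
      have hne : ¬ (PySem.List.pyGetD e2 1 0 = PySem.List.pyGetD e3 0 0) := by
        intro hc; simp [hc.symm] at hp
      simp [aBody, check_square_eq, hne]
    rw [foldl_filter_of_id (aBody L e1 e2)
      (fun e => PySem.List.pyGetD e 0 0 == PySem.List.pyGetD e2 1 0) L hskip3 acc2]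
    refine foldl_congr_mem' _ _ _ ?_ acc2
    intro e3 he3 acc3
    have h23 : PySem.List.pyGetD e2 1 0 = PySem.List.pyGetD e3 0 0 :=
      (by simpa using (List.mem_filter.mp he3).2 : _ = _).symm
    by_cases hg : e1 = e2 ∨ e1 = e3 ∨ e2 = e3
    · simp [aBody, bBody, hg]
    · simp only [aBody, bBody, PySem.Set.mem_ofList, check_square_eq, gsm_add]
      rw [if_neg hg, if_neg hg]
      simp [h12, h23]
  rw [hmain]
  by_cases h4 :
      (L.foldl (bLoop1
        (L.foldl (fun d e => d.modify (PySem.List.pyGetD e 0 0) [] (fun l => l ++ [e]))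
          PySem.Dict.empty)
        (PySem.Set.ofList L)) []).length ≤ 4
  · rw [if_pos h4, if_neg (by omega)]
  · rw [if_neg h4, if_pos (by omega)]
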